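-- pv_equiv track=rewrite | github.com/HenryRobertRice/advent-of-code-2020 | day-04-2.py | is_valid_value
-- ===== SOURCE A (Python) =====
-- def is_valid_value(k, v):
--     if k == "byr":
--         return 1920 <= int(v) <= 2002 if v.isdigit() else False
--     if k == "iyr":
--         return 2010 <= int(v) <= 2020 if v.isdigit() else False
--     if k == "eyr":
--         return 2020 <= int(v) <= 2030 if v.isdigit() else False
--     if k == "hgt":
--         if v[-2:] == "cm":
--             height = v[:len(v) - 2]
--             return 150 <= int(height) <= 193 if height.isdigit() else False
--         if v[-2:] == "in":
--             height = v[:len(v) - 2]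
--             return 59 <= int(height) <= 76 if height.isdigit() else False
--         return False
--     if k == "hcl":
--         return len(v) == 7 and v[0] == "#" and sum([int(c in "1234567890abcdef") for c in v[1:]]) == 6
--     if k == "ecl":
--         return v in ["amb", "blu", "brn", "gry", "grn", "hzl", "oth"]
--     if k == "pid":
--         return len(v) == 9 and v.isdigit()
--     if k == "cid":
--         return True
--     return False
-- ===== SOURCE B (Python) =====
-- # Data-driven rule interpreter: one generic loop over numeric-range rules and one over
-- # length+charset rules replaces A's per-key if-chain (objective: alternative).
--
-- # (key, required suffix, low, high): the value minus the suffix must be all digits in [low, high].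
-- _RANGE_RULES = [
--     ("byr", "", 1920, 2002),
--     ("iyr", "", 2010, 2020),
--     ("eyr", "", 2020, 2030),
--     ("hgt", "cm", 150, 193),
--     ("hgt", "in", 59, 76),
-- ]
--
-- # (key, required prefix, body length, allowed body characters)
-- _CHARSET_RULES = [
--     ("hcl", "#", 6, "0123456789abcdef"),
--     ("pid", "", 9, "0123456789"),
-- ]
--
-- def is_valid_value(k, v):
--     for key, suf, lo, hi in _RANGE_RULES:
--         if key == k and v.endswith(suf):
--             body = v[:len(v) - len(suf)]
--             return body.isdigit() and lo <= int(body) <= hi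
--     for key, pre, n, charset in _CHARSET_RULES:
--         if key == k:
--             return v.startswith(pre) and len(v) == len(pre) + n and all(c in charset for c in v[len(pre):])
--     if k == "ecl":
--         return v in ("amb", "blu", "brn", "gry", "grn", "hzl", "oth")
--     return k == "cid"
-- ===== Notes on version B (the rewrite author's own statement) =====
-- stated objective: alternative
-- what changed: Replaced A's hard-coded per-key if-chain with a small rule interpreter: a generic scan over a table of (key, suffix, low, high) numeric-range rules covers byr/iyr/eyr and both hgt units, a second scan over (key, prefix, body length, charset) rules covers hcl and pid, and only ecl membership and cid remain as literal cases.
import Mathlib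
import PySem

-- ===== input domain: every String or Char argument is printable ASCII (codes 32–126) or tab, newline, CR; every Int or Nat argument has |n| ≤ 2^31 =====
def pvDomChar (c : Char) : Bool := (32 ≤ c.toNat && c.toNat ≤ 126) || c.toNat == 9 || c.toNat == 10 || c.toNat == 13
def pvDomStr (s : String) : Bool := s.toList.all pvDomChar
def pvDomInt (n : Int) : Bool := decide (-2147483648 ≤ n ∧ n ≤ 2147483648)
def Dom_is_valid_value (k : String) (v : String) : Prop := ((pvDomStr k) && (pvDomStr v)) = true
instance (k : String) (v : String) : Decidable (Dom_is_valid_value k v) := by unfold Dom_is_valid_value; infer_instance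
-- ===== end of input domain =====

-- B is a data-driven rule interpreter: one generic scan over numeric-range rules and one over
-- length+charset rules replaces A's per-key if-chain (objective: alternative).

-- ===== PORT A =====
-- int(v): every int() in A is guarded by .isdigit(), under which PySem.Int.ofStr? returns some, so `.getD 0` is exact.
def is_valid_value (k : String) (v : String) : Bool :=
  if k == "byr" then
    (if PySem.Str.strIsdigit v then decide (1920 ≤ (PySem.Int.ofStr? v).getD 0 ∧ (PySem.Int.ofStr? v).getD 0 ≤ 2002) else false)
  else if k == "iyr" then
    (if PySem.Str.strIsdigit v then decide (2010 ≤ (PySem.Int.ofStr? v).getD 0 ∧ (PySem.Int.ofStr? v).getD 0 ≤ 2020) else false)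
  else if k == "eyr" then
    (if PySem.Str.strIsdigit v then decide (2020 ≤ (PySem.Int.ofStr? v).getD 0 ∧ (PySem.Int.ofStr? v).getD 0 ≤ 2030) else false)
  else if k == "hgt" then
    if PySem.Str.slice v (some (-2)) none == "cm" then
      let height := PySem.Str.slice v none (some (PySem.Str.len v - 2))
      (if PySem.Str.strIsdigit height then decide (150 ≤ (PySem.Int.ofStr? height).getD 0 ∧ (PySem.Int.ofStr? height).getD 0 ≤ 193) else false)
    else if PySem.Str.slice v (some (-2)) none == "in" then
      let height := PySem.Str.slice v none (some (PySem.Str.len v - 2))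
      (if PySem.Str.strIsdigit height then decide (59 ≤ (PySem.Int.ofStr? height).getD 0 ∧ (PySem.Int.ofStr? height).getD 0 ≤ 76) else false)
    else false
  else if k == "hcl" then
    -- v[0] is reached only when the first conjunct len(v)==7 holds; pyGet? is total, so plain && is exact.
    decide (PySem.Str.len v = 7) && (PySem.Str.pyGet? v 0 == some '#') &&
      (((PySem.Str.slice v (some 1) none).toList.map
          (fun c => if "1234567890abcdef".toList.contains c then (1 : Int) else 0)).sum == 6)
  else if k == "ecl" then
    ["amb", "blu", "brn", "gry", "grn", "hzl", "oth"].contains v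
  else if k == "pid" then
    decide (PySem.Str.len v = 9) && PySem.Str.strIsdigit v
  else if k == "cid" then
    true
  else false

-- ===== PORT B =====
-- _RANGE_RULES: (key, required suffix, low, high)
def pvRangeRules : List (String × String × Int × Int) :=
  [("byr", "", 1920, 2002), ("iyr", "", 2010, 2020), ("eyr", "", 2020, 2030),
   ("hgt", "cm", 150, 193), ("hgt", "in", 59, 76)]

-- the first `for` loop of B: first matching rule decides; int(body) guarded by isdigit, so `.getD 0` is exact
def pvRangeScan (k v : String) : List (String × String × Int × Int) → Option Bool
  | [] => none
  | (key, suf, lo, hi) :: rest =>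
    if key == k && PySem.Str.endswith v suf then
      let body := PySem.Str.slice v none (some (PySem.Str.len v - PySem.Str.len suf))
      some (PySem.Str.strIsdigit body &&
        decide (lo ≤ (PySem.Int.ofStr? body).getD 0 ∧ (PySem.Int.ofStr? body).getD 0 ≤ hi))
    else pvRangeScan k v rest

-- _CHARSET_RULES: (key, required prefix, body length, allowed body characters)
def pvCharsetRules : List (String × String × Int × String) :=
  [("hcl", "#", 6, "0123456789abcdef"), ("pid", "", 9, "0123456789")]

-- the second `for` loop of B; Python's `c in charset` for a single char c is char membership — exact
def pvCharsetScan (k v : String) : List (String × String × Int × String) → Option Bool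
  | [] => none
  | (key, pre, n, cs) :: rest =>
    if key == k then
      some (PySem.Str.startswith v pre && decide (PySem.Str.len v = PySem.Str.len pre + n) &&
        (PySem.Str.slice v (some (PySem.Str.len pre)) none).toList.all (fun c => cs.toList.contains c))
    else pvCharsetScan k v rest

def is_valid_value_alt (k : String) (v : String) : Bool :=
  match pvRangeScan k v pvRangeRules with
  | some b => b
  | none =>
    match pvCharsetScan k v pvCharsetRules with
    | some b => b
    | none => if k == "ecl" then ["amb", "blu", "brn", "gry", "grn", "hzl", "oth"].contains v
              else k == "cid"

-- ===== PRECONDITION & SPEC =====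
def Spec_is_valid_value (k : String) (v : String) (out : Bool) : Prop := out = is_valid_value_alt k v
instance (k : String) (v : String) (out : Bool) : Decidable (Spec_is_valid_value k v out) := by unfold Spec_is_valid_value; infer_instance

-- ===== CLAIM (what is proved, stated in full; the proofs are below) =====
def Claim_equal_is_valid_value : Prop := ∀ (k : String) (v : String), Dom_is_valid_value k v → Spec_is_valid_value k v (is_valid_value k v)

-- ===== LEMMAS AND PROOFS =====

-- v.endswith("") is always true, and the body v[:len(v)-0] is v itself
theorem endswith_empty (v : String) : PySem.Chars.endswith v.toList [] = true :=
  (PySem.Chars.endswith_iff _ _).mpr List.nil_suffix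

theorem take_len (v : String) : List.take v.length v.toList = v.toList := by
  rw [← String.length_toList, List.take_length]

theorem slice_full (v : String) : PySem.Str.slice v none (some ((v.length : Nat) : Int)) = v := by
  rw [← String.toList_inj, PySem.Str.toList_slice, PySem.Chars.slice_eq_listSlice,
      PySem.List.slice_to_natCast]
  exact take_len v

-- endswith by a two-character suffix coincides with A's test v[-2:] == s
theorem endswith_two (v s : String) (hs : s.toList.length = 2) :
    PySem.Str.endswith v s = (PySem.Str.slice v (some (-2)) none == s) := by
  have hsl : (PySem.Str.slice v (some (-2)) none).toList = v.toList.drop (v.toList.length - 2) := by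
    rw [PySem.Str.toList_slice, PySem.Chars.slice_eq_listSlice,
        PySem.List.slice_from_neg_ofNat v.toList 2 (by omega)]
  by_cases h : s.toList <:+ v.toList
  · have h2 : PySem.Str.endswith v s = true := by
      rw [PySem.Str.endswith_eq]; exact (PySem.Chars.endswith_iff _ _).mpr h
    have hdrop : v.toList.drop (v.toList.length - 2) = s.toList := by
      obtain ⟨p, hp⟩ := h
      rw [← hp]
      have hdl : (p ++ s.toList).length - 2 = p.length := by simp [hs]
      rw [hdl, List.drop_left]
    have h3 : PySem.Str.slice v (some (-2)) none = s := by
      rw [← String.toList_inj, hsl, hdrop]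
    rw [h2, h3]; simp
  · have h2 : PySem.Str.endswith v s = false := by
      rw [PySem.Str.endswith_eq]
      rw [Bool.eq_false_iff]; intro hc; exact h ((PySem.Chars.endswith_iff _ _).mp hc)
    have h3 : ¬ PySem.Str.slice v (some (-2)) none = s := by
      intro hc
      apply h
      rw [← hc, hsl]
      exact List.drop_suffix _ _
    rw [h2]
    simp [h3]

-- hgt: the two hgt rules reproduce A's cm/in branches
theorem hgt_eq (v : String) : is_valid_value "hgt" v = is_valid_value_alt "hgt" v := by
  have e2 : ("cm" : String).toList.length = 2 := by decide
  have e3 : ("in" : String).toList.length = 2 := by decide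
  have hlc : PySem.Str.len ("cm" : String) = 2 := by decide
  have hli : PySem.Str.len ("in" : String) = 2 := by decide
  unfold is_valid_value is_valid_value_alt
  simp only [pvRangeScan, pvRangeRules, pvCharsetScan, pvCharsetRules]
  rw [endswith_two v "cm" e2, endswith_two v "in" e3, hlc, hli]
  by_cases hcm : PySem.Str.slice v (some (-2)) none = "cm"
  · simp [hcm]
  · by_cases hin : PySem.Str.slice v (some (-2)) none = "in"
    · simp [hin]
    · simp [hcm, hin]

-- hcl: A counts hex chars of v[1:] and compares with 6; B checks prefix '#', length 7 and all-hex
set_option maxHeartbeats 1600000 in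
theorem hcl_eq (v : String) : is_valid_value "hcl" v = is_valid_value_alt "hcl" v := by
  have halt : is_valid_value_alt "hcl" v =
      (PySem.Str.startswith v "#" && decide (PySem.Str.len v = PySem.Str.len ("#" : String) + 6) &&
        (PySem.Str.slice v (some (PySem.Str.len ("#" : String))) none).toList.all
          (fun c => "0123456789abcdef".toList.contains c)) := by
    unfold is_valid_value_alt
    simp only [pvRangeScan, pvRangeRules, pvCharsetScan, pvCharsetRules]
    simp
  have hA : is_valid_value "hcl" v
      = (decide (PySem.Str.len v = 7) && (PySem.Str.pyGet? v 0 == some '#') &&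
        (((PySem.Str.slice v (some 1) none).toList.map
            (fun c => if "1234567890abcdef".toList.contains c then (1 : Int) else 0)).sum == 6)) := rfl
  have hlp : PySem.Str.len ("#" : String) = 1 := by decide
  rw [hA, halt, hlp]
  -- startswith "#" ↔ v[0] == '#'
  have hsw : PySem.Str.startswith v "#" = (PySem.Str.pyGet? v 0 == some '#') := by
    have hget : PySem.Str.pyGet? v 0 = v.toList[0]? := by
      have : ((0 : Nat) : Int) = (0 : Int) := rfl
      rw [← this, PySem.Str.pyGet?_natCast]
    rw [PySem.Str.startswith_eq, hget]
    by_cases h : ("#" : String).toList <+: v.toList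
    · have hh : v.toList[0]? = some '#' := by
        obtain ⟨t, ht⟩ := h
        have : v.toList = '#' :: t := by rw [← ht]; rfl
        simp [this]
      rw [(PySem.Chars.startswith_iff _ _).mpr h, hh]
      simp
    · have hh : ¬ v.toList[0]? = some '#' := by
        intro hc
        apply h
        cases hv : v.toList with
        | nil => simp [hv] at hc
        | cons a t =>
          rw [hv] at hc
          simp at hc
          exact ⟨t, by simp [hc]⟩
      have h2 : PySem.Chars.startswith v.toList ("#" : String).toList = false := by
        rw [Bool.eq_false_iff]; intro hc; exact h ((PySem.Chars.startswith_iff _ _).mp hc)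
      rw [h2]
      simp [hh]
  rw [hsw]
  by_cases h7 : PySem.Str.len v = 7
  · have h7' : PySem.Str.len v = 1 + 6 := by omega
    have hlen6 : (PySem.Str.slice v (some 1) none).toList.length = 6 := by
      have hvl : (v.length : Int) = 7 := by simpa [pysem] using h7
      simp [pysem, PySem.List.slice_from_one]
      omega
    simp only [h7]
    set l := (PySem.Str.slice v (some 1) none).toList with hldef
    have e1 : "1234567890abcdef".toList = ['1','2','3','4','5','6','7','8','9','0','a','b','c','d','e','f'] := by decide
    have e2 : "0123456789abcdef".toList = ['0','1','2','3','4','5','6','7','8','9','a','b','c','d','e','f'] := by decide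
    have hperm : List.Perm ['1','2','3','4','5','6','7','8','9','0','a','b','c','d','e','f']
        ['0','1','2','3','4','5','6','7','8','9','a','b','c','d','e','f'] := by decide
    have hpq : ∀ c ∈ l, ("1234567890abcdef".toList.contains c = true
        ↔ "0123456789abcdef".toList.contains c = true) := by
      intro c _
      rw [e1, e2, List.contains_eq_mem, List.contains_eq_mem, decide_eq_true_iff, decide_eq_true_iff]
      exact hperm.mem_iff
    have hsum : (((l.map (fun c => if "1234567890abcdef".toList.contains c then (1 : Int) else 0)).sum == (6 : Int)))
        = l.all (fun c => "0123456789abcdef".toList.contains c) := by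
      rw [PySem.List.sum_map_ite_one_zero, List.countP_congr hpq]
      by_cases hall : l.all (fun c => "0123456789abcdef".toList.contains c) = true
      · have hc : l.countP (fun c => "0123456789abcdef".toList.contains c) = l.length :=
          List.countP_eq_length.mpr (fun a ha => List.all_eq_true.mp hall a ha)
        rw [hall, hc, hlen6]
        norm_num
      · rw [Bool.not_eq_true] at hall
        have hne : l.countP (fun c => "0123456789abcdef".toList.contains c) ≠ l.length := by
          intro h
          rw [← Bool.not_eq_true, List.all_eq_true] at hall
          exact hall (fun a ha => List.countP_eq_length.mp h a ha)
        rw [hall, Bool.eq_false_iff]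
        intro hbe
        have h6 : (↑(l.countP (fun c => "0123456789abcdef".toList.contains c)) : Int) = 6 := eq_of_beq hbe
        exact hne (by omega)
    rw [hsum]
    by_cases hget : (PySem.Str.pyGet? v 0 == some '#') = true <;> simp [Bool.and_comm]
  · have h7' : ¬ PySem.Str.len v = 1 + 6 := by omega
    rw [decide_eq_false h7, decide_eq_false h7']
    simp

-- pid: length 9 + isdigit equals prefix "", length 0+9 and all-digit body
theorem digit_char_eq (c : Char) :
    (decide ('0' ≤ c) && decide (c ≤ '9')) = "0123456789".toList.contains c := by
  rw [Bool.eq_iff_iff]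
  simp only [Bool.and_eq_true, decide_eq_true_iff, List.contains_eq_mem, decide_eq_true_iff]
  have hls : ("0123456789" : String).toList = ['0','1','2','3','4','5','6','7','8','9'] := by decide
  rw [hls]
  simp only [List.mem_cons, List.not_mem_nil, or_false]
  constructor
  · intro ⟨ha, hb⟩
    have ha' : 48 ≤ c.toNat := ha
    have hb' : c.toNat ≤ 57 := hb
    have h10 : c.toNat = 48 ∨ c.toNat = 49 ∨ c.toNat = 50 ∨ c.toNat = 51 ∨ c.toNat = 52 ∨ c.toNat = 53
        ∨ c.toNat = 54 ∨ c.toNat = 55 ∨ c.toNat = 56 ∨ c.toNat = 57 := by omega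
    rcases h10 with h|h|h|h|h|h|h|h|h|h <;> rw [← Char.ofNat_toNat c, h] <;> simp
  · intro hc
    rcases hc with h|h|h|h|h|h|h|h|h|h <;> subst h <;> exact ⟨by decide, by decide⟩

theorem strIsdigit_of_len (v : String) (h9 : PySem.Str.len v = 9) :
    PySem.Str.strIsdigit v = v.toList.all (fun c => "0123456789".toList.contains c) := by
  have hne : v.toList.isEmpty = false := by
    have hl9 : (v.length : Int) = 9 := by simpa [pysem] using h9
    rcases hv : v.toList with _ | ⟨a, t⟩
    · exfalso
      have : v = "" := by rw [← String.toList_inj]; simpa using hv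
      subst this
      simp at hl9
    · simp
  rw [PySem.Str.strIsdigit_eq]
  unfold PySem.Chars.strIsdigit
  rw [hne]
  simp only [Bool.not_false, Bool.true_and]
  have hdc : PySem.Chars.isdigit = (fun c => "0123456789".toList.contains c) := by
    funext c
    rw [← digit_char_eq c]
    rfl
  rw [hdc]

theorem pid_eq (v : String) : is_valid_value "pid" v = is_valid_value_alt "pid" v := by
  have halt : is_valid_value_alt "pid" v =
      (PySem.Str.startswith v "" && decide (PySem.Str.len v = PySem.Str.len ("" : String) + 9) &&
        (PySem.Str.slice v (some (PySem.Str.len ("" : String))) none).toList.all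
          (fun c => "0123456789".toList.contains c)) := by
    unfold is_valid_value_alt
    simp only [pvRangeScan, pvRangeRules, pvCharsetScan, pvCharsetRules]
    simp
  have hA : is_valid_value "pid" v = (decide (PySem.Str.len v = 9) && PySem.Str.strIsdigit v) := rfl
  have hsw : PySem.Str.startswith v "" = true := by
    rw [PySem.Str.startswith_eq]
    exact (PySem.Chars.startswith_iff _ _).mpr (List.nil_prefix)
  have hslice : PySem.Str.slice v (some (PySem.Str.len ("" : String))) none = v := by
    rw [← String.toList_inj]
    have hl0 : PySem.Str.len ("" : String) = ((0 : Nat) : Int) := by decide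
    rw [hl0, PySem.Str.toList_slice, PySem.Chars.slice_eq_listSlice, PySem.List.slice_from_natCast]
    simp
  have hl0 : PySem.Str.len ("" : String) = 0 := by decide
  rw [hA, halt, hsw, hslice, hl0]
  by_cases h9 : PySem.Str.len v = 9
  · have h9' : PySem.Str.len v = 0 + 9 := by omega
    rw [strIsdigit_of_len v h9, decide_eq_true h9, decide_eq_true h9']
    simp
  · have h9' : ¬ PySem.Str.len v = 0 + 9 := by omega
    rw [decide_eq_false h9, decide_eq_false h9']
    simp

-- ===== VERDICT (by name: the statement is the Claim_ definition above) =====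
theorem is_valid_value_spec : Claim_equal_is_valid_value := by
  intro k v _
  unfold Spec_is_valid_value
  by_cases h1 : k = "byr"
  · subst h1
    simp [is_valid_value, is_valid_value_alt, pvRangeScan, pvRangeRules, endswith_empty, slice_full]
  by_cases h2 : k = "iyr"
  · subst h2
    simp [is_valid_value, is_valid_value_alt, pvRangeScan, pvRangeRules, endswith_empty, slice_full]
  by_cases h3 : k = "eyr"
  · subst h3
    simp [is_valid_value, is_valid_value_alt, pvRangeScan, pvRangeRules, endswith_empty, slice_full]
  by_cases h4 : k = "hgt"
  · subst h4; exact hgt_eq v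
  by_cases h5 : k = "hcl"
  · subst h5; exact hcl_eq v
  by_cases h6 : k = "ecl"
  · subst h6; rfl
  by_cases h7 : k = "pid"
  · subst h7; exact pid_eq v
  by_cases h8 : k = "cid"
  · subst h8; rfl
  unfold is_valid_value is_valid_value_alt
  simp only [pvRangeScan, pvRangeRules, pvCharsetScan, pvCharsetRules]
  simp [h1, h2, h3, h4, h5, h6, h7, h8, Ne.symm h1, Ne.symm h2, Ne.symm h3, Ne.symm h4, Ne.symm h5, Ne.symm h7]
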